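/- GENERATED by farm/mkstatement.py from design/units.split.tsv — do not edit.
   THE SPLIT of the proof unit `start_decoder.C8` into `start_decoder.C8a`, `start_decoder.C8b`, `start_decoder.C8c`, `start_decoder.C8d`, `start_decoder.C8e`, `start_decoder.C8f`: the children's statements give the parent's
   UNCHANGED statement (so nothing above the parent — callers, compositions — is touched by the split). -/
import Vorbis.Spec.StartDecoderC8
import Vorbis.Spec.Units.start_decoder_C8
import Vorbis.Spec.Units.start_decoder_C8a
import Vorbis.Spec.Units.start_decoder_C8b
import Vorbis.Spec.Units.start_decoder_C8c
import Vorbis.Spec.Units.start_decoder_C8d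
import Vorbis.Spec.Units.start_decoder_C8e
import Vorbis.Spec.Units.start_decoder_C8f
namespace Vorbis.Spec.Splits
open X86 X86.User Asan

/-- The children of the split unit `start_decoder.C8` prove it, by `Vorbis.Spec.StartDecoder.SegC8.of_parts`. -/
theorem start_decoder_C8
    (h_start_decoder_C8a : Vorbis.Spec.start_decoder_C8a.Statement)
    (h_start_decoder_C8b : Vorbis.Spec.start_decoder_C8b.Statement)
    (h_start_decoder_C8c : Vorbis.Spec.start_decoder_C8c.Statement)
    (h_start_decoder_C8d : Vorbis.Spec.start_decoder_C8d.Statement)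
    (h_start_decoder_C8e : Vorbis.Spec.start_decoder_C8e.Statement)
    (h_start_decoder_C8f : Vorbis.Spec.start_decoder_C8f.Statement) :
    Vorbis.Spec.start_decoder_C8.Statement := by
  intro Lay _hLay μ _hμ u₀ _hcode _h_asan_load4_noabort _h_asan_load1_noabort _h_setup_malloc _h_asan_store8_noabort _h_memset _h_asan_load8_noabort _h_asan_store4_noabort _h_compute_sorted_huffman _h_error _h_setup_temp_free
  apply Vorbis.Spec.StartDecoder.SegC8.of_parts
  · exact h_start_decoder_C8a Lay _hLay μ _hμ u₀ _hcode _h_asan_load4_noabort _h_setup_malloc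
  · exact h_start_decoder_C8b Lay _hLay μ _hμ u₀ _hcode _h_asan_load4_noabort _h_setup_malloc _h_asan_store8_noabort _h_error
  · exact h_start_decoder_C8c Lay _hLay μ _hμ u₀ _hcode _h_asan_load4_noabort _h_asan_store8_noabort _h_memset _h_error
  · exact h_start_decoder_C8d Lay _hLay μ _hμ u₀ _hcode _h_asan_load8_noabort _h_asan_store4_noabort _h_compute_sorted_huffman
  · exact h_start_decoder_C8e Lay _hLay μ _hμ u₀ _hcode _h_asan_load4_noabort _h_asan_load1_noabort _h_setup_temp_free
  · exact h_start_decoder_C8f Lay _hLay μ _hμ u₀ _hcode _h_asan_load4_noabort _h_asan_store8_noabort _h_asan_load8_noabort _h_setup_temp_free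

end Vorbis.Spec.Splits
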